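-- pv_equiv track=rewrite | github.com/aKhalili147/Decision_Tree_Python | decisionTree.py | nb_occurences
-- ===== SOURCE A (Python) =====
-- def nb_occurences(groups):
--     g_nbOccur = []
--     for g in groups:
--         nSetosa, nVersicolor, nVirginica = 0, 0, 0
--
--         # computer nb of occurences
--         for instance in g:
--             if instance[4] == 'Iris-setosa':
--                 nSetosa+=1
--             elif instance[4] == 'Iris-virginica':
--                 nVirginica+=1
--             else:
--                 nVersicolor+=1
--
--         # append nb occurences to a list
--         g_nbOccur.append([nSetosa,nVirginica,nVersicolor])
--
--     return g_nbOccur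
-- ===== SOURCE B (Python) =====
-- def nb_occurences(groups):
--     def row(g):
--         labels = [inst[4] for inst in g]
--         s = labels.count('Iris-setosa')
--         v = labels.count('Iris-virginica')
--         return [s, v, len(g) - s - v]
--     return [row(g) for g in groups]
-- ===== Notes on version B (the rewrite author's own statement) =====
-- stated objective: alternative
-- what changed: B replaces A's single branching pass with three scalar counters by staged passes: it projects each group to its label list, takes two list.count passes for setosa and virginica, and derives the Versicolor slot as the remainder len(g) - s - v, building the result as a map over groups.
import Mathlib
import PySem

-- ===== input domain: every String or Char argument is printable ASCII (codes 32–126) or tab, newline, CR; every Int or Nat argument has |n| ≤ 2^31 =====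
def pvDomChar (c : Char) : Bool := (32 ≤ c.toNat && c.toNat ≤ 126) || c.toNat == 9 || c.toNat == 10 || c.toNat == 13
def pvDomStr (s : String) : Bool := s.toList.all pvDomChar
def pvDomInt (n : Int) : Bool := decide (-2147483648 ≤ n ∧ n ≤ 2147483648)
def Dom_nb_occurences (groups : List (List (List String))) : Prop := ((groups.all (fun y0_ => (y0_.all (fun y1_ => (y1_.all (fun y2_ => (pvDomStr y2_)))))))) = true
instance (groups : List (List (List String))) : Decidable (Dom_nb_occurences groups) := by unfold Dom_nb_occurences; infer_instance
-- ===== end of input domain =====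

-- B computes each group's row by staged passes — project labels, two list.count passes, remainder
-- for the Versicolor slot — as a map over groups (objective: alternative decomposition, same cost).


-- ===== PORT A =====
def nb_occurences (groups : List (List (List String))) : List (List Int) :=
  groups.foldl (fun g_nbOccur g =>
    let t := g.foldl (fun (c : Int × Int × Int) inst =>
      let lab := PySem.List.pyGetD inst 4 ""
      if lab = "Iris-setosa" then (c.1 + 1, c.2.1, c.2.2)
      else if lab = "Iris-virginica" then (c.1, c.2.1, c.2.2 + 1)
      else (c.1, c.2.1 + 1, c.2.2)) (0, 0, 0)
    g_nbOccur ++ [[t.1, t.2.2, t.2.1]]) []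

-- ===== PORT B =====
def nb_occurences_alt (groups : List (List (List String))) : List (List Int) :=
  groups.map (fun g =>
    let labels := g.map (fun inst => PySem.List.pyGetD inst 4 "")
    let s : Int := PySem.List.count labels "Iris-setosa"
    let v : Int := PySem.List.count labels "Iris-virginica"
    [s, v, (g.length : Int) - s - v])

-- ===== PRECONDITION & SPEC =====
-- Pre_ excludes exactly the inputs on which A raises IndexError: a row with fewer than 5 fields.
def Pre_nb_occurences (groups : List (List (List String))) : Prop :=
  ∀ g ∈ groups, ∀ inst ∈ g, 5 ≤ inst.length
instance (groups : List (List (List String))) : Decidable (Pre_nb_occurences groups) := by unfold Pre_nb_occurences; infer_instance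
def pvWitness_nb_occurences : List (List (List String)) :=
  [[["1", "2", "3", "4", "Iris-setosa"], ["1", "2", "3", "4", "weird"]], []]
def Spec_nb_occurences (groups : List (List (List String))) (out : List (List Int)) : Prop := out = nb_occurences_alt groups
instance (groups : List (List (List String))) (out : List (List Int)) : Decidable (Spec_nb_occurences groups out) := by unfold Spec_nb_occurences; infer_instance

-- ===== CLAIM (what is proved, stated in full; the proofs are below) =====
def Claim_equal_nb_occurences : Prop := ∀ (groups : List (List (List String))), Dom_nb_occurences groups → Pre_nb_occurences groups → Spec_nb_occurences groups (nb_occurences groups)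

-- ===== LEMMAS AND PROOFS =====

-- A's inner loop, characterised: the triple accumulates the setosa count, the "neither" count
-- and the virginica count of the group's label list.
theorem nbA_inner (g : List (List String)) (c : Int × Int × Int) :
    g.foldl (fun (c : Int × Int × Int) inst =>
      let lab := PySem.List.pyGetD inst 4 ""
      if lab = "Iris-setosa" then (c.1 + 1, c.2.1, c.2.2)
      else if lab = "Iris-virginica" then (c.1, c.2.1, c.2.2 + 1)
      else (c.1, c.2.1 + 1, c.2.2)) c
    = (c.1 + ((g.map (fun inst => PySem.List.pyGetD inst 4 "")).count "Iris-setosa" : Int),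
       c.2.1 + ((g.length : Int)
         - (g.map (fun inst => PySem.List.pyGetD inst 4 "")).count "Iris-setosa"
         - (g.map (fun inst => PySem.List.pyGetD inst 4 "")).count "Iris-virginica"),
       c.2.2 + ((g.map (fun inst => PySem.List.pyGetD inst 4 "")).count "Iris-virginica" : Int)) := by
  induction g generalizing c with
  | nil => simp
  | cons inst g ih =>
    simp only [List.foldl_cons, List.map_cons, List.length_cons]
    rw [ih]
    by_cases h1 : PySem.List.pyGetD inst 4 "" = "Iris-setosa"
    · simp [h1, List.count_cons, Prod.ext_iff] <;> push_cast <;> omega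
    · by_cases h2 : PySem.List.pyGetD inst 4 "" = "Iris-virginica"
      · simp [h1, h2, List.count_cons, Prod.ext_iff] <;> push_cast <;> omega
      · simp [h1, h2, List.count_cons, Prod.ext_iff] <;> push_cast <;> omega

-- ===== VERDICT (by name: the statement is the Claim_ definition above) =====
theorem nb_occurences_spec : Claim_equal_nb_occurences := by
  intro groups hD hP
  clear hD hP
  unfold Spec_nb_occurences nb_occurences nb_occurences_alt
  rw [PySem.List.foldl_append_singleton_eq_map]
  simp only [List.nil_append]
  refine List.map_congr_left (fun g _ => ?_)
  rw [nbA_inner]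
  simp [PySem.List.count_eq]
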